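-- pv_equiv track=rewrite | github.com/lukefadedaway/adventofcode | 2023/Day 1/sol.py | find_highest_index_substring
-- ===== SOURCE A (Python) =====
-- substrings = ["one", "two", "three", "four", "five", "six", "seven", "eight", "nine"]
--
-- def find_highest_index_substring(input_string):
--     highest_index = float('-inf')
--     highest_substring = ""
--
--     for substring in substrings:
--         index = input_string.rfind(substring)
--         if index != -1 and index > highest_index:
--             highest_index = index
--             highest_substring = substring
--
--     if highest_index == float('-inf'):
--         return (-1, -1)
--     else:
--         return (highest_index, highest_substring)
-- ===== SOURCE B (Python) =====
-- substrings = ["one", "two", "three", "four", "five", "six", "seven", "eight", "nine"]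
--
-- def find_highest_index_substring(input_string):
--     # Scan positions right-to-left; the first position where any word starts
--     # is the highest index, so return immediately.
--     for i in range(len(input_string) - 1, -1, -1):
--         for word in substrings:
--             if input_string.startswith(word, i):
--                 return (i, word)
--     return (-1, -1)
-- ===== Notes on version B (the rewrite author's own statement) =====
-- stated objective: alternative
-- what changed: B scans string positions right-to-left and returns at the first position where any of the nine words starts (early exit), instead of A's per-word rfind loop with a running maximum.
-- outside the precondition, e.g. on find_highest_index_substring('abc'): A returns (-1, -1), B returns (-1, -1)
import Mathlib
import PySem

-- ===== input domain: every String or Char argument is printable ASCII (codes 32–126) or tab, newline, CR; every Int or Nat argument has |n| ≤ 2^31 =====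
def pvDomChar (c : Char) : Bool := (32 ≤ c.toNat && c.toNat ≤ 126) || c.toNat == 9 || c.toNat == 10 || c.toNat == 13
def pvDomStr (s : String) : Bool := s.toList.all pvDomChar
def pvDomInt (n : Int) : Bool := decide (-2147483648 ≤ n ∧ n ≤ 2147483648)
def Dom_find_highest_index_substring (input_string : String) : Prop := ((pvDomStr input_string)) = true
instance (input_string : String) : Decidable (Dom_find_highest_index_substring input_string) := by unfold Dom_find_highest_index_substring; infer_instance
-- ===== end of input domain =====

-- B replaces A's per-word rfind maximisation by a right-to-left scan of positions with early exit (objective: alternative).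

-- ===== PORT A =====
def substringsList : List String :=
  ["one", "two", "three", "four", "five", "six", "seven", "eight", "nine"]

-- float('-inf') modelled as `none` (exact: rfind results are integers and every integer exceeds -inf)
def stepA (cs : List Char) (acc : Option Int × String) (sub : String) : Option Int × String :=
  let index := PySem.Chars.rfind cs sub.toList
  match acc.1 with
  | none => if index ≠ -1 then (some index, sub) else acc
  | some h => if index ≠ -1 ∧ h < index then (some index, sub) else acc

def find_highest_index_substring (input_string : String) : Int × String :=
  let cs := input_string.toList
  let r := substringsList.foldl (stepA cs) (none, "")
  match r.1 with
  | none => (-1, "")   -- Python returns (-1, -1): second component is an int, not a String; excluded by Pre_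
  | some h => (h, r.2)

-- ===== PORT B =====
-- i counts down: altScan cs (n+1) tests position n first (Source B's `for i in range(len-1, -1, -1)`);
-- `input_string.startswith(word, i)` with 0 ≤ i ≤ len is exactly startswith on the dropped suffix.
def altScan (cs : List Char) : Nat → Option (Nat × String)
  | 0 => none
  | n + 1 =>
    match substringsList.find? (fun w => PySem.Chars.startswith (cs.drop n) w.toList) with
    | some w => some (n, w)
    | none => altScan cs n

def find_highest_index_substring_alt (input_string : String) : Int × String :=
  match altScan input_string.toList input_string.toList.length with
  | some (i, w) => ((i : Int), w)
  | none => (-1, "")   -- Python returns (-1, -1): not a value of Int × String; excluded by Pre_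

-- ===== PRECONDITION & SPEC =====
-- Pre_ excludes exactly the strings containing none of the nine digit words: there A returns
-- (-1, -1), whose second component is an int, not a String, so the value is not of the declared
-- type Int × String (B returns the same (-1, -1) there in Python).
def Pre_find_highest_index_substring (input_string : String) : Prop :=
  (substringsList.any (fun w => PySem.Str.isIn w input_string)) = true
instance (input_string : String) : Decidable (Pre_find_highest_index_substring input_string) := by
  unfold Pre_find_highest_index_substring; infer_instance

def pvWitness_find_highest_index_substring : String := "two1nine"

def Spec_find_highest_index_substring (input_string : String) (out : Int × String) : Prop :=
  out = find_highest_index_substring_alt input_string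
instance (input_string : String) (out : Int × String) :
    Decidable (Spec_find_highest_index_substring input_string out) := by
  unfold Spec_find_highest_index_substring; infer_instance

-- ===== CLAIM (what is proved, stated in full; the proofs are below) =====
def Claim_equal_find_highest_index_substring : Prop :=
  ∀ (input_string : String), Dom_find_highest_index_substring input_string →
    Pre_find_highest_index_substring input_string →
    Spec_find_highest_index_substring input_string (find_highest_index_substring input_string)

-- ===== LEMMAS AND PROOFS =====

-- does any of the nine words start at position i?
def occB (cs : List Char) (i : Nat) : Bool :=
  substringsList.any (fun w => PySem.Chars.startswith (cs.drop i) w.toList)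

lemma words_ne_nil : ∀ w ∈ substringsList, w.toList ≠ [] := by decide

lemma words_prefix_antisymm :
    ∀ w1 ∈ substringsList, ∀ w2 ∈ substringsList, w1.toList <+: w2.toList → w1 = w2 := by decide

lemma uniq_at {t : List Char} {w1 w2 : String}
    (h1 : w1 ∈ substringsList) (h2 : w2 ∈ substringsList)
    (p1 : w1.toList <+: t) (p2 : w2.toList <+: t) : w1 = w2 := by
  rcases List.prefix_or_prefix_of_prefix p1 p2 with h | h
  · exact words_prefix_antisymm w1 h1 w2 h2 h
  · exact (words_prefix_antisymm w2 h2 w1 h1 h).symm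

lemma go_cases (cs sub : List Char) (k : Nat) :
    PySem.Chars.rfind.go cs sub k = -1 ∨
      ∃ m : Nat, m ≤ k ∧ PySem.Chars.rfind.go cs sub k = (m : Int) ∧ sub <+: cs.drop m := by
  induction k with
  | zero =>
    by_cases h : sub.isPrefixOf cs
    · exact Or.inr ⟨0, le_rfl, by simp [PySem.Chars.rfind.go, h], by
        simpa using (List.isPrefixOf_iff_prefix.mp h)⟩
    · exact Or.inl (by simp [PySem.Chars.rfind.go, h])
  | succ j ih =>
    by_cases h : sub.isPrefixOf (cs.drop (j + 1))
    · exact Or.inr ⟨j + 1, le_rfl, by simp [PySem.Chars.rfind.go, h],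
        List.isPrefixOf_iff_prefix.mp h⟩
    · rcases ih with h' | ⟨m, hm, he, hp⟩
      · exact Or.inl (by simp [PySem.Chars.rfind.go, h, h'])
      · exact Or.inr ⟨m, Nat.le_succ_of_le hm, by simp [PySem.Chars.rfind.go, h, he], hp⟩

lemma go_ge (cs sub : List Char) (k i : Nat) (hik : i ≤ k) (hp : sub <+: cs.drop i) :
    (i : Int) ≤ PySem.Chars.rfind.go cs sub k := by
  induction k with
  | zero =>
    interval_cases i
    simp only [List.drop_zero] at hp
    simp [PySem.Chars.rfind.go, List.isPrefixOf_iff_prefix.mpr hp]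
  | succ j ih =>
    by_cases h : sub.isPrefixOf (cs.drop (j + 1))
    · simp only [PySem.Chars.rfind.go, h, if_true]
      exact_mod_cast hik
    · rcases Nat.lt_succ_iff_lt_or_eq.mp (Nat.lt_succ_of_le hik) with h' | h'
      · simpa [PySem.Chars.rfind.go, h] using ih (Nat.lt_succ_iff.mp h')
      · exact absurd (List.isPrefixOf_iff_prefix.mpr (h' ▸ hp)) h

-- position of any match is < length (words are nonempty)
lemma match_lt_len {cs : List Char} {i : Nat} (h : occB cs i = true) : i < cs.length := by
  rcases List.any_eq_true.mp h with ⟨w, hw, hsw⟩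
  have hp : w.toList <+: cs.drop i := (PySem.Chars.startswith_iff _ _).mp hsw
  by_contra hge
  have : cs.drop i = [] := List.drop_eq_nil_of_le (Nat.le_of_not_lt hge)
  rw [this] at hp
  exact words_ne_nil w hw (List.prefix_nil.mp hp)

-- the greatest matching position
lemma rfind_le (cs : List Char) (i0 : Nat)
    (hmax : ∀ m : Nat, m ≤ cs.length → occB cs m = true → m ≤ i0)
    {w : String} (hw : w ∈ substringsList) :
    PySem.Chars.rfind cs w.toList ≤ (i0 : Int) := by
  unfold PySem.Chars.rfind
  rcases go_cases cs w.toList cs.length with h | ⟨m, hm, he, hp⟩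
  · rw [h]; omega
  · rw [he]
    have : occB cs m = true :=
      List.any_eq_true.mpr ⟨w, hw, (PySem.Chars.startswith_iff _ _).mpr hp⟩
    exact_mod_cast hmax m hm this

lemma rfind_eq_i0 (cs : List Char) (i0 : Nat)
    (hmax : ∀ m : Nat, m ≤ cs.length → occB cs m = true → m ≤ i0)
    (hlt : i0 < cs.length)
    {w : String} (hw : w ∈ substringsList) (hp : w.toList <+: cs.drop i0) :
    PySem.Chars.rfind cs w.toList = (i0 : Int) := by
  have h1 := rfind_le cs i0 hmax hw
  have h2 := go_ge cs w.toList cs.length i0 (Nat.le_of_lt hlt) hp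
  have hgo : PySem.Chars.rfind cs w.toList = PySem.Chars.rfind.go cs w.toList cs.length := rfl
  rw [hgo] at h1 ⊢
  omega

lemma rfind_lt_of_ne (cs : List Char) (i0 : Nat)
    (hmax : ∀ m : Nat, m ≤ cs.length → occB cs m = true → m ≤ i0)
    {w w0 : String} (hw : w ∈ substringsList) (hw0 : w0 ∈ substringsList)
    (hp0 : w0.toList <+: cs.drop i0) (hne : w ≠ w0) :
    PySem.Chars.rfind cs w.toList < (i0 : Int) := by
  have hle := rfind_le cs i0 hmax hw
  have hgo : PySem.Chars.rfind cs w.toList = PySem.Chars.rfind.go cs w.toList cs.length := rfl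
  rcases go_cases cs w.toList cs.length with h | ⟨m, hm, he, hp⟩
  · rw [hgo, h]; omega
  · rw [hgo, he] at hle ⊢
    rcases Nat.lt_or_ge m i0 with h' | h'
    · exact_mod_cast h'
    · have : m = i0 := le_antisymm (by exact_mod_cast hle) h'
      subst this
      exact absurd (uniq_at hw hw0 hp hp0) hne

-- B's scan hits the rightmost match
lemma altScan_hit (cs : List Char) (n i : Nat) (w : String) (hin : i < n)
    (hfind : substringsList.find? (fun w => PySem.Chars.startswith (cs.drop i) w.toList) = some w)
    (hnone : ∀ j, i < j → j < n → occB cs j = false) :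
    altScan cs n = some (i, w) := by
  induction n with
  | zero => omega
  | succ m ih =>
    rcases Nat.lt_succ_iff_lt_or_eq.mp hin with h | h
    · have hm : occB cs m = false := hnone m h (Nat.lt_succ_self m)
      have : substringsList.find? (fun w => PySem.Chars.startswith (cs.drop m) w.toList) = none := by
        rw [List.find?_eq_none]
        intro x hx hsx
        exact absurd (List.any_eq_true.mpr ⟨x, hx, hsx⟩) (by simp [occB] at hm ⊢; exact hm)
      simp only [altScan, this]
      exact ih h (fun j hj1 hj2 => hnone j hj1 (Nat.lt_succ_of_lt hj2))
    · subst h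
      simp only [altScan, hfind]

-- A's fold, after the winning word has been installed
lemma fold_after (cs : List Char) (i0 : Nat) (w0 : String) (W : List String)
    (hle : ∀ w ∈ W, PySem.Chars.rfind cs w.toList ≤ (i0 : Int)) :
    W.foldl (stepA cs) (some (i0 : Int), w0) = (some (i0 : Int), w0) := by
  induction W with
  | nil => rfl
  | cons w W' ih =>
    have h := hle w (List.mem_cons_self ..)
    have hstep : stepA cs (some (i0 : Int), w0) w = (some (i0 : Int), w0) := by
      simp only [stepA]
      split_ifs with hc
      · exact absurd hc (by push Not; intro _; omega)
      · rfl
    rw [List.foldl_cons, hstep]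
    exact ih (fun x hx => hle x (List.mem_cons_of_mem _ hx))

-- A's fold reaches exactly (i0, w0)
lemma fold_main (cs : List Char) (i0 : Nat) (w0 : String)
    (hr0 : PySem.Chars.rfind cs w0.toList = (i0 : Int)) :
    ∀ (W : List String) (acc : Option Int × String), w0 ∈ W →
    (∀ w ∈ W, PySem.Chars.rfind cs w.toList ≤ (i0 : Int)) →
    (∀ w ∈ W, w ≠ w0 → PySem.Chars.rfind cs w.toList < (i0 : Int)) →
    (acc.1 = none ∨ ∃ h : Int, h < (i0 : Int) ∧ ∃ str, acc = (some h, str)) →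
    W.foldl (stepA cs) acc = (some (i0 : Int), w0) := by
  intro W
  induction W with
  | nil => intro acc h; exact absurd h (List.not_mem_nil)
  | cons w W' ih =>
    intro acc hmem hle hlt hinv
    by_cases hw : w = w0
    · have hrw : PySem.Chars.rfind cs w.toList = (i0 : Int) := by rw [hw]; exact hr0
      have hstep : stepA cs acc w = (some (i0 : Int), w0) := by
        rcases hinv with h | ⟨h, hhi, str, rfl⟩
        · obtain ⟨str, rfl⟩ : ∃ str, acc = (none, str) := by
            rcases acc with ⟨a1, a2⟩; simp_all
          simp only [stepA, hrw]
          rw [if_pos (by omega), hw]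
        · simp only [stepA, hrw]
          rw [if_pos ⟨by omega, hhi⟩, hw]
      rw [List.foldl_cons, hstep]
      exact fold_after cs i0 w0 W' (fun x hx => hle x (List.mem_cons_of_mem _ hx))
    · have hwlt : PySem.Chars.rfind cs w.toList < (i0 : Int) :=
        hlt w (List.mem_cons_self ..) hw
      have hmem' : w0 ∈ W' := by
        rcases List.mem_cons.mp hmem with h | h
        · exact absurd h.symm hw
        · exact h
      have hinv' : (stepA cs acc w).1 = none ∨
          ∃ h : Int, h < (i0 : Int) ∧ ∃ str, stepA cs acc w = (some h, str) := by
        rcases hinv with h | ⟨h, hhi, str, rfl⟩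
        · obtain ⟨str, rfl⟩ : ∃ str, acc = (none, str) := by
            rcases acc with ⟨a1, a2⟩; simp_all
          simp only [stepA]
          split_ifs with hc
          · exact Or.inr ⟨_, hwlt, w, rfl⟩
          · exact Or.inl rfl
        · simp only [stepA]
          split_ifs with hc
          · exact Or.inr ⟨_, hwlt, w, rfl⟩
          · exact Or.inr ⟨h, hhi, str, rfl⟩
      rw [List.foldl_cons]
      exact ih (stepA cs acc w) hmem'
        (fun x hx => hle x (List.mem_cons_of_mem _ hx))
        (fun x hx hne => hlt x (List.mem_cons_of_mem _ hx) hne) hinv'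

-- ===== VERDICT (by name: the statement is the Claim_ definition above) =====
theorem find_highest_index_substring_spec : Claim_equal_find_highest_index_substring := by
  intro s _ hpre
  unfold Spec_find_highest_index_substring
  set cs := s.toList with hcs
  -- some word occurs somewhere
  have hex : ∃ j : Nat, occB cs j = true := by
    unfold Pre_find_highest_index_substring at hpre
    rcases List.any_eq_true.mp hpre with ⟨w, hw, hin⟩
    have : w.toList <:+: cs := (PySem.Str.isIn_iff_infix _ _).mp hin
    rcases (PySem.Chars.exists_prefix_drop_iff_isIn w.toList cs).mpr
        ((PySem.Chars.isIn_iff_infix w.toList cs).mpr this) with ⟨j, hj⟩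
    exact ⟨j, List.any_eq_true.mpr ⟨w, hw, (PySem.Chars.startswith_iff _ _).mpr hj⟩⟩
  obtain ⟨j, hj⟩ := hex
  have hjlt : j < cs.length := match_lt_len hj
  -- the greatest matching position
  set i0 := Nat.findGreatest (fun i => occB cs i = true) cs.length with hi0
  have hocc : occB cs i0 = true :=
    Nat.findGreatest_spec (P := fun i => occB cs i = true) (Nat.le_of_lt hjlt) hj
  have hmax : ∀ m : Nat, m ≤ cs.length → occB cs m = true → m ≤ i0 := by
    intro m hm hom
    exact Nat.le_findGreatest hm hom
  have hi0lt : i0 < cs.length := match_lt_len hocc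
  -- the unique word matching there
  have hfs : (substringsList.find? (fun w => PySem.Chars.startswith (cs.drop i0) w.toList)).isSome := by
    rcases List.any_eq_true.mp hocc with ⟨w, hw, hsw⟩
    exact List.find?_isSome.mpr ⟨w, hw, hsw⟩
  obtain ⟨w0, hfind⟩ := Option.isSome_iff_exists.mp hfs
  have hw0mem : w0 ∈ substringsList := List.mem_of_find?_eq_some hfind
  have hw0pref : w0.toList <+: cs.drop i0 :=
    (PySem.Chars.startswith_iff _ _).mp
      (List.find?_some (p := fun (w : String) => PySem.Chars.startswith (cs.drop i0) w.toList) hfind)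
  -- rfind facts
  have hr0 : PySem.Chars.rfind cs w0.toList = (i0 : Int) :=
    rfind_eq_i0 cs i0 hmax hi0lt hw0mem hw0pref
  -- B's value
  have hB : find_highest_index_substring_alt s = ((i0 : Int), w0) := by
    unfold find_highest_index_substring_alt
    rw [← hcs, altScan_hit cs cs.length i0 w0 hi0lt hfind
      (fun j hj1 hj2 => by
        by_contra hc
        have := hmax j (Nat.le_of_lt hj2) (Bool.not_eq_false _ |>.mp hc)
        omega)]
  -- A's value
  have hA : find_highest_index_substring s = ((i0 : Int), w0) := by
    have hfold := fold_main cs i0 w0 hr0 substringsList (none, "") hw0mem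
      (fun w hw => rfind_le cs i0 hmax hw)
      (fun w hw hne => rfind_lt_of_ne cs i0 hmax hw hw0mem hw0pref hne)
      (Or.inl rfl)
    show (match (List.foldl (stepA cs) (none, "") substringsList).1 with
          | none => ((-1 : Int), "")
          | some h => (h, (List.foldl (stepA cs) (none, "") substringsList).2)) = ((i0 : Int), w0)
    rw [hfold]
  rw [hA, hB]
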